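-- pv_equiv track=rewrite | github.com/pujaari/starter-micro-api | backprop2.py | hitung
-- ===== SOURCE A (Python) =====
-- def hitung(hasil):
--     jml_memuaskan = 0
--     jml_cumlaude = 0
--     jml_baik = 0
--     jml_cukup = 0
--     jml_kurang = 0
--     for i in hasil:
--         if i == "Memuaskan":
--             jml_memuaskan = jml_memuaskan+1
--         elif i == "Cumlaude":
--             jml_cumlaude = jml_cumlaude+1
--         elif i == "Baik":
--             jml_baik = jml_baik+1
--         elif i == "Cukup":
--             jml_cukup = jml_cukup+1
--         elif i == "Kurang":
--             jml_kurang = jml_kurang+1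
--     return jml_memuaskan, jml_cumlaude, jml_baik, jml_cukup, jml_kurang
-- ===== SOURCE B (Python) =====
-- def hitung(hasil):
--     lst = list(hasil)
--     return (lst.count("Memuaskan"), lst.count("Cumlaude"),
--             lst.count("Baik"), lst.count("Cukup"), lst.count("Kurang"))
-- ===== Notes on version B (the rewrite author's own statement) =====
-- stated objective: idiomatic
-- what changed: A's single accumulating pass with a five-way branch is replaced by five independent list.count scans over the materialised input.
import Mathlib
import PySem

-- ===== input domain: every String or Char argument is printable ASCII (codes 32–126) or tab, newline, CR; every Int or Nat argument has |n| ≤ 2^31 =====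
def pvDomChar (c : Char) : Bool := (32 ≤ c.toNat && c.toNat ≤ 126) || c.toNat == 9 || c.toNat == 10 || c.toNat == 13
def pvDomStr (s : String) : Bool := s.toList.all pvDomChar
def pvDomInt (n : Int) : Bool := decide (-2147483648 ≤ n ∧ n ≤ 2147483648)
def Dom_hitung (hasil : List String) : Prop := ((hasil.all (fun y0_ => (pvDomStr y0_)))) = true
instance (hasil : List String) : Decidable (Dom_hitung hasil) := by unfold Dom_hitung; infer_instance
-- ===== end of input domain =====

-- B replaces A's single accumulating five-way-branch pass with five independent count scans (idiomatic; same cost).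


-- ===== PORT A =====
def hitung (hasil : List String) : Int × Int × Int × Int × Int :=
  let s := hasil.foldl (fun (acc : Int × Int × Int × Int × Int) i =>
    let (m, cl, b, ck, k) := acc
    if i == "Memuaskan" then (m + 1, cl, b, ck, k)
    else if i == "Cumlaude" then (m, cl + 1, b, ck, k)
    else if i == "Baik" then (m, cl, b + 1, ck, k)
    else if i == "Cukup" then (m, cl, b, ck + 1, k)
    else if i == "Kurang" then (m, cl, b, ck, k + 1)
    else (m, cl, b, ck, k)) (0, 0, 0, 0, 0)
  s

-- ===== PORT B =====
def hitung_alt (hasil : List String) : Int × Int × Int × Int × Int :=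
  let lst := hasil
  ((PySem.List.count lst "Memuaskan" : Int), (PySem.List.count lst "Cumlaude" : Int),
   (PySem.List.count lst "Baik" : Int), (PySem.List.count lst "Cukup" : Int),
   (PySem.List.count lst "Kurang" : Int))

-- ===== PRECONDITION & SPEC =====
def Spec_hitung (hasil : List String) (out : Int × Int × Int × Int × Int) : Prop := out = hitung_alt hasil
instance (hasil : List String) (out : Int × Int × Int × Int × Int) : Decidable (Spec_hitung hasil out) := by unfold Spec_hitung; infer_instance

-- ===== CLAIM (what is proved, stated in full; the proofs are below) =====
def Claim_equal_hitung : Prop := ∀ (hasil : List String), Dom_hitung hasil → Spec_hitung hasil (hitung hasil)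

-- ===== LEMMAS AND PROOFS =====

-- ===== VERDICT (by name: the statement is the Claim_ definition above) =====
set_option maxHeartbeats 1000000 in
-- loop invariant: A's fold starting from (m,cl,b,ck,k) adds the five counts componentwise
theorem hitung_fold_eq (hasil : List String) (m cl b ck k : Int) :
    hasil.foldl (fun (acc : Int × Int × Int × Int × Int) i =>
      let (m, cl, b, ck, k) := acc
      if i == "Memuaskan" then (m + 1, cl, b, ck, k)
      else if i == "Cumlaude" then (m, cl + 1, b, ck, k)
      else if i == "Baik" then (m, cl, b + 1, ck, k)
      else if i == "Cukup" then (m, cl, b, ck + 1, k)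
      else if i == "Kurang" then (m, cl, b, ck, k + 1)
      else (m, cl, b, ck, k)) (m, cl, b, ck, k)
    = (m + hasil.count "Memuaskan", cl + hasil.count "Cumlaude",
       b + hasil.count "Baik", ck + hasil.count "Cukup", k + hasil.count "Kurang") := by
  induction hasil generalizing m cl b ck k with
  | nil => simp
  | cons x xs ih =>
    simp only [List.foldl_cons, List.count_cons]
    by_cases h1 : x = "Memuaskan" <;> by_cases h2 : x = "Cumlaude" <;>
      by_cases h3 : x = "Baik" <;> by_cases h4 : x = "Cukup" <;> by_cases h5 : x = "Kurang" <;>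
      simp_all [ih] <;> push_cast <;> ring_nf

theorem hitung_spec : Claim_equal_hitung := by
  intro hasil _
  unfold Spec_hitung hitung hitung_alt
  simp only [hitung_fold_eq, PySem.List.count_eq]
  push_cast
  simp
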